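-- pv_equiv track=rewrite | github.com/Cynquivy/CSINTSY-MCO2 | pinoybot.py | quick_oth
-- ===== SOURCE A (Python) =====
-- def quick_oth(token: str) -> bool:
--     t = "" if token is None else str(token)
--     if t == '':
--         return True
--     if all(not ch.isalnum() for ch in t):     # punctuation-only, emojis, symbols
--         return True
--     if any(ch.isdigit() for ch in t):         # numeric tokens (years, amounts, ids)
--         return True
--     return False
-- ===== SOURCE B (Python) =====
-- def quick_oth(token: str) -> bool:
--     t = "" if token is None else str(token)
--     # Single-flag state machine: the first digit decides True immediately;
--     # otherwise one bit tracks whether an alphanumeric was seen, and the end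
--     # of the string answers "no alphanumeric seen". No emptiness test and no
--     # combination of A's three conditions is ever computed.
--     seen_alnum = False
--     for ch in t:
--         if ch.isdigit():
--             return True
--         seen_alnum = seen_alnum or ch.isalnum()
--     return not seen_alnum
-- ===== Notes on version B (the rewrite author's own statement) =====
-- stated objective: alternative
-- what changed: Replaces A's three staged tests (emptiness check, all-non-alnum scan, any-digit scan) by a single-pass one-flag state machine: the first digit returns True immediately, otherwise one bit records whether an alphanumeric was seen and the end of the string returns its negation; B never tests emptiness and never combines A's conditions.
import Mathlib
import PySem

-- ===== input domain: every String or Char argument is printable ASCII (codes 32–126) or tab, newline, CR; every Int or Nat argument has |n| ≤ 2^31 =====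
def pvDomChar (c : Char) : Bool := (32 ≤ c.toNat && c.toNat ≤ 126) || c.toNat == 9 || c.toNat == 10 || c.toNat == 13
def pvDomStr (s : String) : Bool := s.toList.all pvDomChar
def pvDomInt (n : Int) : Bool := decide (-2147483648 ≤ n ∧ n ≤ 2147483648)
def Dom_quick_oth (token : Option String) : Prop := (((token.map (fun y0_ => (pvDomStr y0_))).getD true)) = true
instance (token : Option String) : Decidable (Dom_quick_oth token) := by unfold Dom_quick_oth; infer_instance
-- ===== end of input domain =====

-- B replaces A's three staged tests by a single-pass one-flag state machine with early True on the first digit; same results, alternative decomposition.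

-- ===== PORT A =====
def quick_oth (token : Option String) : Bool :=
  let t := match token with | none => "" | some s => s
  if t = "" then true
  else if t.toList.all (fun ch => !(PySem.Chars.isalnum ch)) then true
  else if t.toList.any (fun ch => PySem.Chars.isdigit ch) then true
  else false

-- ===== PORT B =====
-- the state-machine loop: first digit → true; end → "no alphanumeric was seen"
def qoGo : List Char → Bool → Bool
  | [], seen => !seen
  | ch :: rest, seen =>
    if PySem.Chars.isdigit ch then true
    else qoGo rest (seen || PySem.Chars.isalnum ch)

def quick_oth_alt (token : Option String) : Bool :=
  let t := match token with | none => "" | some s => s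
  qoGo t.toList false

-- ===== PRECONDITION & SPEC =====
def Spec_quick_oth (token : Option String) (out : Bool) : Prop := out = quick_oth_alt token
instance (token : Option String) (out : Bool) : Decidable (Spec_quick_oth token out) := by unfold Spec_quick_oth; infer_instance

-- ===== CLAIM (what is proved, stated in full; the proofs are below) =====
def Claim_equal_quick_oth : Prop := ∀ (token : Option String), Dom_quick_oth token → Spec_quick_oth token (quick_oth token)

-- ===== LEMMAS AND PROOFS =====

lemma qoGo_eq (cs : List Char) : ∀ seen,
    qoGo cs seen
      = (cs.any PySem.Chars.isdigit || !(seen || cs.any PySem.Chars.isalnum)) := by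
  induction cs with
  | nil => intro seen; simp [qoGo]
  | cons ch rest ih =>
    intro seen
    by_cases hdi : PySem.Chars.isdigit ch <;>
      simp [qoGo, hdi, ih, Bool.or_assoc]

-- ===== VERDICT (by name: the statement is the Claim_ definition above) =====
theorem quick_oth_spec : Claim_equal_quick_oth := by
  intro token _
  show quick_oth token = quick_oth_alt token
  cases token with
  | none => simp [quick_oth, quick_oth_alt, qoGo]
  | some s =>
    simp only [quick_oth, quick_oth_alt, qoGo_eq]
    by_cases ht : s = ""
    · simp [ht]
    · cases ha : s.toList.any PySem.Chars.isalnum <;>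
      cases hd : s.toList.any (fun ch => PySem.Chars.isdigit ch) <;>
        simp [ht, ha, hd, List.all_eq_not_any_not]
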